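-- pv_equiv track=rewrite | github.com/ScriptBloxX/tobeit67-compo | test5.py | cd
-- ===== SOURCE A (Python) =====
-- def findkey(n):
--     i = [key for key, value in n.items() if value > 1]
--     v = [n[key] for key in i]
--     return len(i),sum([length for length in v])
--
-- def cd(n):
--     s = set()
--     result = 0
--     if len(n)==4:
--         for i in n:
--             if i in s:
--                 result += 1
--             else:
--                 s.add(i)
--     if len(n)==6 or len(n)==8:
--         result={}
--         for i in n:
--             if not i in s:
--                 s.add(i)
--                 result[i] = 1
--             elif i in s:
--                 result[i] += 1
--         return findkey(result)
--
--     duplicate_count = {}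
--
--     for i in n:
--         if n.count(i) > 1 and i not in duplicate_count:
--             duplicate_count[i] = n.count(i)
--     duplicate_lengths = sum([length for length in duplicate_count.values()])
--
--     return result, duplicate_lengths
-- ===== SOURCE B (Python) =====
-- def cd(n):
--     counts = {}
--     for x in n:
--         counts[x] = counts.get(x, 0) + 1
--     dup = [v for v in counts.values() if v > 1]
--     duplicate_lengths = sum(dup)
--     if len(n) == 6 or len(n) == 8:
--         return len(dup), duplicate_lengths
--     result = len(n) - len(counts) if len(n) == 4 else 0
--     return result, duplicate_lengths
-- ===== Notes on version B (the rewrite author's own statement) =====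
-- stated objective: faster
-- what changed: One frequency dict built in a single pass replaces both the repeated O(n) n.count scans and the per-branch set/dict loops; the len==4 accumulator loop becomes the closed form len(n)-len(counts) and the 6/8 and default branches are read off the same table.
import Mathlib
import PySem

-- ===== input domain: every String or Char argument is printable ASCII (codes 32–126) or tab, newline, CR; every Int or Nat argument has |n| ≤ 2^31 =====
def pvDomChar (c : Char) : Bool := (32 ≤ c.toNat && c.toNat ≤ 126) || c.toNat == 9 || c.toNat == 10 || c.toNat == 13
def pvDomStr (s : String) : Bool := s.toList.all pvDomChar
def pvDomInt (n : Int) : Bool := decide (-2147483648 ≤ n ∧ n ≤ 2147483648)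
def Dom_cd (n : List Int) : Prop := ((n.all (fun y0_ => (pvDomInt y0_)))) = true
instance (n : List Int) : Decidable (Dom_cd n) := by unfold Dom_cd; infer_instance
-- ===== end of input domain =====

-- B replaces A's repeated n.count scans and per-branch set/dict loops by one frequency
-- dict built in a single pass, with closed forms per length branch (objective: faster).

-- ===== PORT A =====
def findkey (d : PySem.Dict Int Int) : Int × Int :=
  let i := (d.items.filter (fun p => 1 < p.2)).map (fun p => p.1)
  -- n[key]: every key of i is a key of d (it comes from d.items), so getD is exact here
  let v := i.map (fun k => d.getD k 0)
  ((i.length : Int), v.sum)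

def cdLoop4 (p : PySem.Set Int × Int) (i : Int) : PySem.Set Int × Int :=
  if p.1.contains i then (p.1, p.2 + 1) else (PySem.Set.add p.1 i, p.2)

-- the elif's condition 'i in s' is always true when reached (s was just tested), so it is the else branch;
-- result[i] += 1 cannot raise a KeyError there (i ∈ s ↔ i is a key), so insert/getD is exact
def cdLoop68 (p : PySem.Set Int × PySem.Dict Int Int) (i : Int) :
    PySem.Set Int × PySem.Dict Int Int :=
  if !(p.1.contains i) then (PySem.Set.add p.1 i, p.2.insert i 1)
  else (p.1, p.2.insert i (p.2.getD i 0 + 1))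

def cd (n : List Int) : Int × Int :=
  let s : PySem.Set Int := PySem.Set.empty
  let result : Int := 0
  let st := if n.length = 4 then n.foldl cdLoop4 (s, result) else (s, result)
  if n.length = 6 ∨ n.length = 8 then
    findkey (n.foldl cdLoop68 (st.1, PySem.Dict.empty)).2
  else
    let dc := n.foldl (fun (d : PySem.Dict Int Int) i =>
        if 1 < PySem.List.count n i ∧ ¬ d.contains i
        then d.insert i ((PySem.List.count n i : Nat) : Int) else d) PySem.Dict.empty
    (st.2, dc.values.sum)

-- ===== PORT B =====
def cd_alt (n : List Int) : Int × Int :=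
  let counts := n.foldl (fun (d : PySem.Dict Int Int) x => d.insert x (d.getD x 0 + 1))
    PySem.Dict.empty
  let dup := counts.values.filter (fun v => 1 < v)
  let dl := dup.sum
  if n.length = 6 ∨ n.length = 8 then ((dup.length : Int), dl)
  else ((if n.length = 4 then (n.length : Int) - (counts.size : Int) else 0), dl)

-- ===== PRECONDITION & SPEC =====
def Spec_cd (n : List Int) (out : Int × Int) : Prop := out = cd_alt n
instance (n : List Int) (out : Int × Int) : Decidable (Spec_cd n out) := by
  unfold Spec_cd; infer_instance

-- ===== CLAIM (what is proved, stated in full; the proofs are below) =====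
def Claim_equal_cd : Prop := ∀ (n : List Int), Dom_cd n → Spec_cd n (cd n)

-- ===== LEMMAS AND PROOFS =====

-- distinct new elements of the second list, in first-occurrence order, relative to a seen list
def distFrom (seen : List Int) : List Int → List Int
  | [] => []
  | i :: t => if i ∈ seen then distFrom seen t else i :: distFrom (seen ++ [i]) t

theorem distFrom_congr (s₁ s₂ : List Int) (l : List Int) (h : ∀ x, x ∈ s₁ ↔ x ∈ s₂) :
    distFrom s₁ l = distFrom s₂ l := by
  induction l generalizing s₁ s₂ with
  | nil => rfl
  | cons i t ih =>
      simp only [distFrom]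
      by_cases hi : i ∈ s₁
      · rw [if_pos hi, if_pos ((h i).1 hi)]; exact ih _ _ h
      · rw [if_neg hi, if_neg (fun hx => hi ((h i).2 hx))]
        exact congrArg _ (ih _ _ (by intro x; simp [h x]))

theorem update_eq_append_distFrom (s : PySem.Set Int) (l : List Int) :
    PySem.Set.update s l = s ++ distFrom s l := by
  induction l generalizing s with
  | nil => simp [PySem.Set.update, distFrom]
  | cons i t ih =>
      have hstep : PySem.Set.update s (i :: t) = PySem.Set.update (PySem.Set.add s i) t := rfl
      by_cases hi : i ∈ s
      · have : PySem.Set.add s i = s := by simp [PySem.Set.add, PySem.Set.contains, hi]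
        rw [hstep, this, ih, distFrom, if_pos hi]
      · have : PySem.Set.add s i = s ++ [i] := by simp [PySem.Set.add, PySem.Set.contains, hi]
        rw [hstep, this, ih, distFrom, if_neg hi]
        simp

theorem ofList_eq_distFrom (l : List Int) : PySem.Set.ofList l = distFrom [] l := by
  have := update_eq_append_distFrom [] l
  simpa [PySem.Set.ofList_eq_foldl, PySem.Set.update] using this

theorem distFrom_append_singleton (l : List Int) (s : List Int) (i : Int) :
    distFrom (s ++ [i]) l = (distFrom s l).filter (fun x => x ≠ i) := by
  induction l generalizing s with
  | nil => rfl
  | cons j t ih =>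
      simp only [distFrom]
      by_cases hj : j ∈ s
      · rw [if_pos (by simp [hj]), if_pos hj, ih]
      · by_cases hji : j = i
        · subst hji
          rw [if_pos (by simp), if_neg hj]
          rw [distFrom_congr (s ++ [j]) (s ++ [j] ++ [j]) t (by intro x; simp)]
          rw [ih]
          simp
        · rw [if_neg (by simp [hj, hji]), if_neg hj]
          simp only [List.filter_cons]
          rw [if_pos (by simp [hji])]
          rw [distFrom_congr (s ++ [i] ++ [j]) (s ++ [j] ++ [i]) t (by intro x; simp; tauto)]
          rw [ih]

-- A's len==4 loop counts repeats: result + |seen ∪ l| = r + |seen| + |l|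
theorem loop4_invariant (l : List Int) (s : PySem.Set Int) (r : Int) :
    (l.foldl cdLoop4 (s, r)).2 + ((PySem.Set.update s l).length : Int)
      = r + (s.length : Int) + (l.length : Int) := by
  induction l generalizing s r with
  | nil => simp [PySem.Set.update]
  | cons i t ih =>
      have hstep : PySem.Set.update s (i :: t) = PySem.Set.update (PySem.Set.add s i) t := rfl
      by_cases hi : i ∈ s
      · have hb : cdLoop4 (s, r) i = (s, r + 1) := by
          simp [cdLoop4, PySem.Set.contains, hi]
        have ha : PySem.Set.add s i = s := by simp [PySem.Set.add, PySem.Set.contains, hi]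
        rw [List.foldl_cons, hb, hstep, ha]
        have := ih s (r + 1)
        simp only [List.length_cons]
        push_cast at this ⊢
        omega
      · have hb : cdLoop4 (s, r) i = (s ++ [i], r) := by
          simp [cdLoop4, PySem.Set.contains, hi, PySem.Set.add]
        have ha : PySem.Set.add s i = s ++ [i] := by simp [PySem.Set.add, PySem.Set.contains, hi]
        rw [List.foldl_cons, hb, hstep, ha]
        have := ih (s ++ [i]) r
        simp only [List.length_cons, List.length_append, List.length_nil] at this ⊢
        push_cast at this ⊢
        omega

-- A's 6/8 loop dict equals B's counter loop (the set mirrors the dict's keys)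
theorem loop68_dict (l : List Int) (s : PySem.Set Int) (d : PySem.Dict Int Int)
    (h : s = d.keys) :
    (l.foldl cdLoop68 (s, d)).2
      = l.foldl (fun d x => d.insert x (d.getD x 0 + 1)) d := by
  induction l generalizing s d with
  | nil => rfl
  | cons i t ih =>
      by_cases hi : i ∈ s
      · have hdc : d.contains i = true := by
          rw [PySem.Dict.contains_eq_decide_mem_keys]; subst h; simp [hi]
        have hb : cdLoop68 (s, d) i = (s, d.insert i (d.getD i 0 + 1)) := by
          simp [cdLoop68, PySem.Set.contains, hi]
        rw [List.foldl_cons, hb, List.foldl_cons]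
        exact ih s _ (by rw [PySem.Dict.keys_insert_of_contains d _ hdc, h])
      · have hdc : d.contains i = false := by
          rw [PySem.Dict.contains_eq_decide_mem_keys]; subst h; simp [hi]
        have hg : d.getD i 0 = 0 := PySem.Dict.getD_of_not_contains d 0 hdc
        have hb : cdLoop68 (s, d) i = (s ++ [i], d.insert i 1) := by
          simp [cdLoop68, PySem.Set.contains, hi, PySem.Set.add]
        rw [List.foldl_cons, hb, List.foldl_cons]
        have h1 : d.insert i (d.getD i 0 + 1) = d.insert i 1 := by rw [hg]; norm_num
        rw [h1]
        exact ih _ _ (by rw [PySem.Dict.keys_insert_of_not_contains d _ hdc, h])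

-- PySem.List.count is Mathlib's List.count
theorem pycount_eq (n : List Int) (x : Int) : PySem.List.count n x = List.count x n := by
  simp [PySem.List.count, List.count]

-- A's duplicate_count loop: items are the new (>1-count) first occurrences, paired with their counts
theorem dcLoop_items (n : List Int) (l : List Int) (d : PySem.Dict Int Int) :
    (l.foldl (fun (d : PySem.Dict Int Int) i =>
        if 1 < PySem.List.count n i ∧ ¬ d.contains i
        then d.insert i ((PySem.List.count n i : Nat) : Int) else d) d).items
      = d.items ++ ((distFrom d.keys l).filter
          (fun k => decide (1 < PySem.List.count n k))).map
            (fun k => (k, ((PySem.List.count n k : Nat) : Int))) := by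
  induction l generalizing d with
  | nil => simp [distFrom]
  | cons i t ih =>
      simp only [List.foldl_cons, distFrom]
      by_cases hk : i ∈ d.keys
      · have hdc : d.contains i = true := by
          simp [PySem.Dict.contains_eq_decide_mem_keys, hk]
        rw [if_neg (by simp [hdc]), if_pos hk]
        exact ih d
      · have hdc : d.contains i = false := by
          simp [PySem.Dict.contains_eq_decide_mem_keys, hk]
        rw [if_neg hk]
        by_cases hcnt : 1 < PySem.List.count n i
        · rw [if_pos ⟨hcnt, by simp [hdc]⟩]
          rw [ih]
          rw [PySem.Dict.items_insert_of_not_contains d _ hdc,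
              PySem.Dict.keys_insert_of_not_contains d _ hdc]
          rw [List.filter_cons, if_pos (by simpa using hcnt)]
          simp [List.append_assoc]
        · rw [if_neg (by tauto)]
          rw [ih]
          congr 1
          rw [distFrom_append_singleton, List.filter_cons,
              if_neg (by simpa using hcnt), List.filter_filter]
          refine congrArg (List.map _) (List.filter_congr ?_)
          intro x _
          by_cases hx : x = i
          · subst hx; simp; rw [← pycount_eq]; omega
          · simp [hx]

-- B's dup list, written over the distinct elements of n
theorem dup_eq (n : List Int) :
    ((PySem.Dict.counter n).values.filter (fun v => (1 : Int) < v))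
      = ((PySem.Set.ofList n).filter (fun k => decide (1 < PySem.List.count n k))).map
          (fun k => ((PySem.List.count n k : Nat) : Int)) := by
  have hv : (PySem.Dict.counter n).values
      = (PySem.Set.ofList n).map (fun k => ((List.count k n : Nat) : Int)) := by
    simp [PySem.Dict.values, PySem.Dict.items_counter]
  have hp : ((fun v => decide ((1 : Int) < v)) ∘ fun k => ((List.count k n : Nat) : Int))
      = fun k => decide (1 < PySem.List.count n k) := by
    funext x; simp [Function.comp]
  have hf : (fun k => ((List.count k n : Nat) : Int))
      = fun k => ((PySem.List.count n k : Nat) : Int) := by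
    funext x; rw [pycount_eq]
  rw [hv, List.filter_map, hp, hf]

-- ===== VERDICT (by name: the statement is the Claim_ definition above) =====
theorem cd_spec : Claim_equal_cd := by
  intro n _
  unfold Spec_cd cd cd_alt
  rw [PySem.Dict.foldl_insert_getD_add_one_eq_counter]
  by_cases h68 : n.length = 6 ∨ n.length = 8
  · rw [if_pos h68, if_pos h68, if_neg (by omega)]
    rw [loop68_dict n PySem.Set.empty PySem.Dict.empty rfl,
        PySem.Dict.foldl_insert_getD_add_one_eq_counter]
    unfold findkey
    rw [dup_eq]
    have hitems := PySem.Dict.items_counter n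
    have hfc : ((fun (p : Int × Int) => decide (1 < p.2)) ∘
        (fun k => (k, ((List.count k n : Nat) : Int))))
        = fun k => decide (1 < PySem.List.count n k) := by
      funext x; simp [Function.comp]
    rw [hitems, List.filter_map, hfc]
    dsimp only
    simp only [Prod.mk.injEq]
    refine ⟨by simp, ?_⟩
    rw [List.map_map, List.map_map]
    refine congrArg List.sum (List.map_congr_left ?_)
    intro x hx
    simp only [Function.comp]
    rw [PySem.Dict.getD_counter, pycount_eq]
  · rw [if_neg h68, if_neg h68]
    dsimp only
    simp only [Prod.mk.injEq]
    constructor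
    · by_cases h4 : n.length = 4
      · rw [if_pos h4, if_pos h4]
        have hinv := loop4_invariant n PySem.Set.empty 0
        have hsize : ((PySem.Dict.counter n).size : Int)
            = ((PySem.Set.ofList n).length : Int) := by
          simp [PySem.Dict.size, PySem.Dict.items_counter]
        have hupd : PySem.Set.update PySem.Set.empty n = PySem.Set.ofList n := by
          simp [PySem.Set.update, PySem.Set.ofList_eq_foldl, PySem.Set.empty]
        rw [hupd] at hinv
        simp only [PySem.Set.empty, List.length_nil, Nat.cast_zero] at hinv ⊢
        rw [hsize]
        omega
      · rw [if_neg h4, if_neg h4]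
    · have hl : ∀ (d : PySem.Dict Int Int), d.values = d.items.map (fun p => p.2) := by
        intro d; rfl
      rw [hl, dcLoop_items n n PySem.Dict.empty, dup_eq, ofList_eq_distFrom]
      have hke : (PySem.Dict.empty : PySem.Dict Int Int).keys = [] := by
        simp [PySem.Dict.keys, PySem.Dict.empty]
      rw [hke]
      simp only [PySem.Dict.empty, List.nil_append, List.map_map]
      refine congrArg List.sum (List.map_congr_left ?_)
      intro x _
      rfl
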